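-- pv_equiv track=rewrite | github.com/cosmicexplorer/mutation-optimizer | lib/mutation-optimizer.py | homology_repeats
-- ===== SOURCE A (Python) =====
-- def homology_repeats(dna_seq):      # sequence of 6 bases that shows up more than once in sequence
--     homologies=0
--     for i in range(0,len(dna_seq)-5):
--         seq_window=dna_seq[i]+dna_seq[i+1]+dna_seq[i+2]+dna_seq[i+3]+dna_seq[i+4]+dna_seq[i+5]
--         if not any(base in seq_window for base in ('R', 'Y', 'N')):
--             if dna_seq.count(seq_window)>=2:
--                 homologies+=1
--     return homologies
-- ===== SOURCE B (Python) =====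
-- def homology_repeats(dna_seq):
--     # One pass: index every 6-base window by its positions, then decide each distinct
--     # window once with a greedy non-overlapping count (instead of str.count per position).
--     n = len(dna_seq)
--     windows = [dna_seq[i:i + 6] for i in range(n - 5)]
--     pos = {}
--     for i, w in enumerate(windows):
--         pos.setdefault(w, []).append(i)
--     good = set()
--     for w, ps in pos.items():
--         if 'R' in w or 'Y' in w or 'N' in w:
--             continue
--         cnt = 0
--         nxt = 0
--         for p in ps:
--             if p >= nxt:
--                 cnt += 1
--                 nxt = p + 6
--         if cnt >= 2:
--             good.add(w)
--     total = 0
--     for w in windows: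
--         if w in good:
--             total += 1
--     return total
-- ===== Notes on version B (the rewrite author's own statement) =====
-- stated objective: faster
-- what changed: B makes one pass to index every 6-base window by its positions in a dict, decides each DISTINCT window once via a greedy non-overlapping occurrence count over its position list, and sums group sizes, instead of A's full str.count scan of the sequence at every position.
import Mathlib
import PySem

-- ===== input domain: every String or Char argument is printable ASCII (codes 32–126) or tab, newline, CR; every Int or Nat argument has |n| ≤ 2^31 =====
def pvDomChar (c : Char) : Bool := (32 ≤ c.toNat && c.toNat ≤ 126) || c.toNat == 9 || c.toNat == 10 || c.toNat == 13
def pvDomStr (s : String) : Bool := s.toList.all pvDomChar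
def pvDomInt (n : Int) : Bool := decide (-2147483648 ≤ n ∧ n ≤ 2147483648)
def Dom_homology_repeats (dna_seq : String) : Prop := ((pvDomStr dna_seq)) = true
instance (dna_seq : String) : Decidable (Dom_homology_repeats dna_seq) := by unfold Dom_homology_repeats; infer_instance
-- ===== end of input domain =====

-- B indexes all 6-base windows by position in one pass and decides each DISTINCT window once
-- with a greedy non-overlapping count, instead of A's str.count scan per position (objective: faster).

-- ===== PORT A =====
def homology_repeats (dna_seq : String) : Int :=
  let s := dna_seq.toList
  (PySem.List.pyRange 0 ((s.length : Int) - 5) 1).foldl (fun homologies i =>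
    -- dna_seq[i]+…+dna_seq[i+5]; for i ∈ range(0, len-5) all six indices are in range,
    -- so pyGetD's default is never read
    let seq_window := [PySem.List.pyGetD s i ' ', PySem.List.pyGetD s (i+1) ' ',
                       PySem.List.pyGetD s (i+2) ' ', PySem.List.pyGetD s (i+3) ' ',
                       PySem.List.pyGetD s (i+4) ' ', PySem.List.pyGetD s (i+5) ' ']
    if !((['R','Y','N'] : List Char).any (fun base => PySem.Chars.isIn [base] seq_window)) then
      if PySem.Chars.count s seq_window ≥ 2 then homologies + 1 else homologies
    else homologies) 0

-- ===== PORT B =====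
def homology_repeats_alt (dna_seq : String) : Int :=
  let s := dna_seq.toList
  let n : Int := s.length
  let windows := (PySem.List.pyRange 0 (n - 5) 1).map (fun i => PySem.List.slice s (some i) (some (i + 6)))
  let pos := (PySem.List.enumerate windows).foldl
      (fun d p => d.modify p.2 [] (· ++ [p.1]))
      (PySem.Dict.empty : PySem.Dict (List Char) (List Int))
  let good := pos.items.foldl (fun g p =>
      if PySem.Chars.isIn ['R'] p.1 || PySem.Chars.isIn ['Y'] p.1 || PySem.Chars.isIn ['N'] p.1 then g
      else
        let cn := p.2.foldl (fun st q => if st.2 ≤ q then (st.1 + 1, q + 6) else st) ((0 : Int), (0 : Int))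
        if cn.1 ≥ 2 then PySem.Set.add g p.1 else g)
      (PySem.Set.empty : PySem.Set (List Char))
  windows.foldl (fun total w => if PySem.Set.contains good w then total + 1 else total) 0

-- ===== PRECONDITION & SPEC =====
def Spec_homology_repeats (dna_seq : String) (out : Int) : Prop := out = homology_repeats_alt dna_seq
instance (dna_seq : String) (out : Int) : Decidable (Spec_homology_repeats dna_seq out) := by unfold Spec_homology_repeats; infer_instance

-- ===== CLAIM (what is proved, stated in full; the proofs are below) =====
def Claim_equal_homology_repeats : Prop := ∀ (dna_seq : String), Dom_homology_repeats dna_seq → Spec_homology_repeats dna_seq (homology_repeats dna_seq)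

-- ===== LEMMAS AND PROOFS =====

def pvG (w : List Char) : Nat → List Char → Nat
  | 0, _ => 0
  | _ + 1, [] => 0
  | fuel + 1, h :: t => if w.isPrefixOf (h :: t) then 1 + pvG w fuel ((h :: t).drop w.length) else pvG w fuel t

theorem pvG_nil (w : List Char) (f : Nat) : pvG w f [] = 0 := by cases f <;> simp [pvG]

theorem pvG_succ (w : List Char) (f : Nat) (l : List Char) (hl : l ≠ []) :
    pvG w (f + 1) l = if w.isPrefixOf l then 1 + pvG w f (l.drop w.length) else pvG w f l.tail := by
  cases l with
  | nil => simp at hl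
  | cons h t => simp [pvG]

theorem pv_go_eq (w : List Char) :
    ∀ (fuel : Nat) (l : List Char) (acc : Nat), PySem.Chars.count.go w fuel l acc = acc + pvG w fuel l := by
  intro fuel
  induction fuel with
  | zero => intro l acc; simp [PySem.Chars.count.go, pvG]
  | succ f ih =>
    intro l acc
    cases l with
    | nil => simp [PySem.Chars.count.go, pvG]
    | cons h t =>
      rw [pvG_succ _ _ _ (by simp)]
      by_cases hp : w.isPrefixOf (h :: t)
      · simp only [PySem.Chars.count.go, hp, if_true, ih]
        omega
      · simp only [PySem.Chars.count.go, hp, ih]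
        rfl

theorem pv_count_eq (s w : List Char) (hw : w ≠ []) :
    PySem.Chars.count s w = pvG w s.length s := by
  rw [PySem.Chars.count, if_neg (by simpa using hw), pv_go_eq w s.length s 0, Nat.zero_add]

theorem pvG_fuel (w : List Char) (hw : w ≠ []) :
    ∀ (f f' : Nat) (l : List Char), l.length ≤ f → l.length ≤ f' → pvG w f l = pvG w f' l := by
  intro f
  induction f with
  | zero =>
    intro f' l h _
    have : l = [] := List.eq_nil_of_length_eq_zero (by omega)
    subst this; simp [pvG_nil]
  | succ f ih =>
    intro f' l h h'
    cases l with
    | nil => simp [pvG_nil]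
    | cons a t =>
      cases f' with
      | zero => simp at h'
      | succ f'' =>
        rw [pvG_succ _ _ _ (by simp), pvG_succ _ _ _ (by simp)]
        have hwl : 1 ≤ w.length := List.length_pos_iff.mpr hw
        by_cases hp : w.isPrefixOf (a :: t)
        · simp only [hp, if_true]
          have h1 : (List.drop w.length (a :: t)).length ≤ f := by
            rw [List.length_drop]; simp only [List.length_cons] at h ⊢; omega
          have h2 : (List.drop w.length (a :: t)).length ≤ f'' := by
            rw [List.length_drop]; simp only [List.length_cons] at h' ⊢; omega
          rw [ih f'' _ h1 h2]
        · simp only [hp, Bool.false_eq_true, if_false]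
          exact ih f'' t (by simp at h ⊢; omega) (by simp at h' ⊢; omega)

theorem pv_occ_bound (s w : List Char) (hw : w ≠ []) (i : Nat)
    (h : w.isPrefixOf (s.drop i) = true) : i + w.length ≤ s.length := by
  have hp := List.isPrefixOf_iff_prefix.mp h
  have h1 : w.length ≤ (s.drop i).length := hp.length_le
  have h2 : 1 ≤ w.length := List.length_pos_iff.mpr hw
  rw [List.length_drop] at h1
  omega

theorem pv_none (s w : List Char) :
    ∀ (f nxt : Nat), (∀ q, nxt ≤ q → w.isPrefixOf (s.drop q) = false) →
      pvG w f (s.drop nxt) = 0 := by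
  intro f
  induction f with
  | zero => intro nxt _; simp [pvG]
  | succ f ih =>
    intro nxt hno
    rcases h : s.drop nxt with _ | ⟨a, t⟩
    · simp [pvG]
    · rw [← h, pvG_succ _ _ _ (by simp [h]), hno nxt le_rfl, if_neg (by simp),
        List.tail_drop]
      exact ih (nxt + 1) (fun q hq => hno q (by omega))

theorem pv_first (s w : List Char) (hw : w ≠ []) :
    ∀ (d j p : Nat), d = s.length - j → j ≤ p → w.isPrefixOf (s.drop p) = true →
      (∀ q, j ≤ q → q < p → w.isPrefixOf (s.drop q) = false) →
      pvG w (s.length - j) (s.drop j) =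
        1 + pvG w (s.length - (p + w.length)) (s.drop (p + w.length)) := by
  intro d
  induction d with
  | zero =>
    intro j p hd hjp hp _
    -- s.length ≤ j contradicts p < s.length
    have hb := pv_occ_bound s w hw p hp
    have h2 : 1 ≤ w.length := List.length_pos_iff.mpr hw
    omega
  | succ f ih =>
    intro j p hd hjp hp hmin
    have hb := pv_occ_bound s w hw p hp
    have h2 : 1 ≤ w.length := List.length_pos_iff.mpr hw
    have hjlen : j < s.length := by omega
    have hne : s.drop j ≠ [] := by
      intro hnil; have := List.drop_eq_nil_iff.mp hnil; omega
    have hlenj : s.length - j = (s.length - (j+1)) + 1 := by omega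
    by_cases hj : j = p
    · subst hj
      rw [hlenj, pvG_succ _ _ _ hne, if_pos hp, List.drop_drop]
      exact congrArg (1 + ·)
        (pvG_fuel w hw _ _ _ (by rw [List.length_drop]; omega) (by rw [List.length_drop]))
    · rw [hlenj, pvG_succ _ _ _ hne, if_neg (by simp [hmin j le_rfl (by omega)]), List.tail_drop]
      exact ih (j + 1) p (by omega) (by omega) hp (fun q hq1 hq2 => hmin q (by omega) hq2)

theorem pv_greedy (s w : List Char) (hw6 : w.length = 6) :
    ∀ (qs : List Int) (cnt nxt : Int), 0 ≤ nxt →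
      List.Pairwise (· < ·) qs →
      (∀ q ∈ qs, ∃ k : Nat, q = (k : Int) ∧ w.isPrefixOf (s.drop k) = true) →
      (∀ k : Nat, nxt ≤ (k : Int) → w.isPrefixOf (s.drop k) = true → (k : Int) ∈ qs) →
      (qs.foldl (fun st q => if st.2 ≤ q then (st.1 + 1, q + 6) else st) (cnt, nxt)).1
        = cnt + (pvG w (s.length - nxt.toNat) (s.drop nxt.toNat) : Int) := by
  have hw : w ≠ [] := by intro h; rw [h] at hw6; simp at hw6
  intro qs
  induction qs with
  | nil =>
    intro cnt nxt h0 _ _ hcomp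
    have hz : pvG w (s.length - nxt.toNat) (s.drop nxt.toNat) = 0 := by
      apply pv_none
      intro r hr
      cases h : w.isPrefixOf (s.drop r)
      · rfl
      · exact absurd (hcomp r (by omega) h) List.not_mem_nil
    simp [hz]
  | cons q rest ih =>
    intro cnt nxt h0 hpw hmem hcomp
    have hrest_gt : ∀ x ∈ rest, q < x := (List.pairwise_cons.mp hpw).1
    have hpw' := (List.pairwise_cons.mp hpw).2
    by_cases hq : nxt ≤ q
    · obtain ⟨p, hqp, hppre⟩ := hmem q (List.mem_cons_self)
      have hpn : p + w.length ≤ s.length := pv_occ_bound s w hw p hppre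
      simp only [List.foldl_cons, if_pos hq]
      rw [ih (cnt + 1) (q + 6) (by omega)
        hpw'
        (fun x hx => hmem x (List.mem_cons_of_mem _ hx))
        (by
          intro k hk hkpre
          have hin := hcomp k (by omega) hkpre
          rcases List.mem_cons.mp hin with h | h
          · exfalso; omega
          · exact h)]
      have hmin : ∀ r, nxt.toNat ≤ r → r < p → w.isPrefixOf (s.drop r) = false := by
        intro r hr1 hr2
        cases h : w.isPrefixOf (s.drop r)
        · rfl
        exfalso
        have hin := hcomp r (by omega) h
        rcases List.mem_cons.mp hin with h' | h'
        · omega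
        · have := hrest_gt _ h'
          omega
      have hfirst := pv_first s w hw (s.length - nxt.toNat) nxt.toNat p rfl (by omega) hppre hmin
      rw [hfirst, hw6]
      have hq6 : (q + 6).toNat = p + 6 := by omega
      rw [hq6]
      push_cast
      ring
    · simp only [List.foldl_cons, if_neg hq]
      apply ih cnt nxt h0 hpw' (fun x hx => hmem x (List.mem_cons_of_mem _ hx))
      intro k hk hkpre
      have hin := hcomp k hk hkpre
      rcases List.mem_cons.mp hin with h | h
      · exfalso
        obtain ⟨p, hqp, _⟩ := hmem q (List.mem_cons_self)
        omega
      · exact h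

def pvWin (s : List Char) (k : Nat) : List Char := (s.drop k).take 6

theorem pv_range (x : Int) :
    PySem.List.pyRange 0 x 1 = (List.range x.toNat).map (fun k : Nat => (k : Int)) := by
  by_cases h : x ≤ 0
  · rw [PySem.List.pyRange_one_eq_nil h]
    have : x.toNat = 0 := by omega
    rw [this]; simp
  · have hx : x = (x.toNat : Int) := by omega
    rw [hx, PySem.List.pyRange_zero_natCast x.toNat, Int.toNat_natCast]

theorem pv_windowA (s : List Char) (k : Nat) (h : k + 6 ≤ s.length) :
    [PySem.List.pyGetD s (k : Int) ' ', PySem.List.pyGetD s ((k : Int) + 1) ' ',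
     PySem.List.pyGetD s ((k : Int) + 2) ' ', PySem.List.pyGetD s ((k : Int) + 3) ' ',
     PySem.List.pyGetD s ((k : Int) + 4) ' ', PySem.List.pyGetD s ((k : Int) + 5) ' ']
      = pvWin s k := by
  have c1 : (k : Int) + 1 = ((k + 1 : Nat) : Int) := by push_cast; ring
  have c2 : (k : Int) + 2 = ((k + 2 : Nat) : Int) := by push_cast; ring
  have c3 : (k : Int) + 3 = ((k + 3 : Nat) : Int) := by push_cast; ring
  have c4 : (k : Int) + 4 = ((k + 4 : Nat) : Int) := by push_cast; ring
  have c5 : (k : Int) + 5 = ((k + 5 : Nat) : Int) := by push_cast; ring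
  rw [c1, c2, c3, c4, c5, PySem.List.pyGetD_natCast, PySem.List.pyGetD_natCast,
     PySem.List.pyGetD_natCast, PySem.List.pyGetD_natCast, PySem.List.pyGetD_natCast,
     PySem.List.pyGetD_natCast]
  rw [List.getD_eq_getElem s ' ' (by omega : k < s.length),
      List.getD_eq_getElem s ' ' (by omega : k + 1 < s.length),
      List.getD_eq_getElem s ' ' (by omega : k + 2 < s.length),
      List.getD_eq_getElem s ' ' (by omega : k + 3 < s.length),
      List.getD_eq_getElem s ' ' (by omega : k + 4 < s.length),
      List.getD_eq_getElem s ' ' (by omega : k + 5 < s.length)]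
  apply List.ext_getElem
  · simp [pvWin]; omega
  · intro j hj hj2
    simp only [pvWin, List.getElem_take, List.getElem_drop]
    simp only [List.length_cons, List.length_nil] at hj
    interval_cases j <;> simp

def pvM (s : List Char) : Nat := ((s.length : Int) - 5).toNat

def pvWL (s : List Char) : List (List Char) := (List.range (pvM s)).map (pvWin s)

def pvPS (s w : List Char) : List Int :=
  ((PySem.List.enumerate (pvWL s)).filter (fun p => p.2 == w)).map (fun p => p.1)

def pvClean (w : List Char) : Bool :=
  !(PySem.Chars.isIn ['R'] w || PySem.Chars.isIn ['Y'] w || PySem.Chars.isIn ['N'] w)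

def pvCond (s w : List Char) : Bool := pvClean w && decide (2 ≤ PySem.Chars.count s w)

theorem pv_mem_range_iff (s : List Char) (k : Nat) : k < pvM s ↔ k + 6 ≤ s.length := by
  unfold pvM; omega

theorem pv_windows_eq (s : List Char) :
    (PySem.List.pyRange 0 ((s.length : Int) - 5) 1).map
      (fun i => PySem.List.slice s (some i) (some (i + 6))) = pvWL s := by
  rw [pv_range, List.map_map]
  apply List.map_congr_left
  intro k _
  show PySem.List.slice s (some (k : Int)) (some ((k : Int) + 6)) = pvWin s k
  have h6 : ((6 : Nat) : Int) = (6 : Int) := by norm_num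
  rw [← h6, PySem.List.slice_natCast_add]
  rfl

theorem pv_win_len (s : List Char) (k : Nat) (h : k + 6 ≤ s.length) :
    (pvWin s k).length = 6 := by
  simp [pvWin]; omega

theorem pv_win_prefix (s : List Char) (k : Nat) :
    (pvWin s k).isPrefixOf (s.drop k) = true :=
  List.isPrefixOf_iff_prefix.mpr (List.take_prefix _ _)

theorem pv_prefix_win (s w : List Char) (k : Nat) (hw6 : w.length = 6)
    (h : w.isPrefixOf (s.drop k) = true) : pvWin s k = w := by
  have := List.prefix_iff_eq_take.mp (List.isPrefixOf_iff_prefix.mp h)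
  rw [pvWin, ← hw6, ← this]

theorem pv_getD_pos (s w : List Char) :
    ((PySem.List.enumerate (pvWL s)).foldl
      (fun d p => d.modify p.2 [] (· ++ [p.1]))
      (PySem.Dict.empty : PySem.Dict (List Char) (List Int))).getD w [] = pvPS s w := by
  have hswap : (PySem.List.enumerate (pvWL s)).foldl
      (fun d p => d.modify p.2 [] (· ++ [p.1]))
      (PySem.Dict.empty : PySem.Dict (List Char) (List Int))
      = ((PySem.List.enumerate (pvWL s)).map (fun p => (p.2, p.1))).foldl
      (fun d p => d.modify p.1 [] (· ++ [p.2])) PySem.Dict.empty := by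
    rw [List.foldl_map]
  rw [hswap, PySem.Dict.getD_foldl_modify_append]
  rw [List.filter_map, List.map_map, pvPS]
  congr 1

theorem pv_keys_pos (s : List Char) :
    ((PySem.List.enumerate (pvWL s)).foldl
      (fun d p => d.modify p.2 [] (· ++ [p.1]))
      (PySem.Dict.empty : PySem.Dict (List Char) (List Int))).keys = PySem.Set.ofList (pvWL s) := by
  rw [PySem.Dict.keys_foldl_modify_key (key := fun p : Int × List Char => p.2) (d0 := [])
    (f := fun d p => (· ++ [p.1]))]
  rw [PySem.Dict.keys_empty, PySem.List.map_snd_enumerate, PySem.Set.ofList_eq_foldl]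
  rfl

theorem pv_nodup_keys_pos (s : List Char) :
    ((PySem.List.enumerate (pvWL s)).foldl
      (fun d p => d.modify p.2 [] (· ++ [p.1]))
      (PySem.Dict.empty : PySem.Dict (List Char) (List Int))).keys.Nodup := by
  apply PySem.Dict.nodup_keys_foldl_modify_key (key := fun p : Int × List Char => p.2) (d0 := [])
    (f := fun d p => (· ++ [p.1]))
  simp [PySem.Dict.keys_empty]

theorem pv_items_pos (s : List Char) :
    ((PySem.List.enumerate (pvWL s)).foldl
      (fun d p => d.modify p.2 [] (· ++ [p.1]))
      (PySem.Dict.empty : PySem.Dict (List Char) (List Int))).items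
      = (PySem.Set.ofList (pvWL s)).map (fun w => (w, pvPS s w)) := by
  rw [PySem.Dict.items_eq_map_keys _ (pv_nodup_keys_pos s) []]
  rw [pv_keys_pos]
  apply List.map_congr_left
  intro w _
  rw [pv_getD_pos]

def pvGCond (p : List Char × List Int) : Bool :=
  !(PySem.Chars.isIn ['R'] p.1 || PySem.Chars.isIn ['Y'] p.1 || PySem.Chars.isIn ['N'] p.1)
  && decide (2 ≤ (p.2.foldl (fun st q => if st.2 ≤ q then (st.1 + 1, q + 6) else st) ((0:Int), (0:Int))).1)

theorem pv_good_eq (l : List (List Char × List Int)) :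
    l.foldl (fun g p =>
      if PySem.Chars.isIn ['R'] p.1 || PySem.Chars.isIn ['Y'] p.1 || PySem.Chars.isIn ['N'] p.1 then g
      else
        let cn := p.2.foldl (fun st q => if st.2 ≤ q then (st.1 + 1, q + 6) else st) ((0 : Int), (0 : Int))
        if cn.1 ≥ 2 then PySem.Set.add g p.1 else g)
      (PySem.Set.empty : PySem.Set (List Char))
    = PySem.Set.ofList ((l.filter pvGCond).map (fun p => p.1)) := by
  have hbody : (fun (g : PySem.Set (List Char)) (p : List Char × List Int) =>
      if PySem.Chars.isIn ['R'] p.1 || PySem.Chars.isIn ['Y'] p.1 || PySem.Chars.isIn ['N'] p.1 then g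
      else
        let cn := p.2.foldl (fun st q => if st.2 ≤ q then (st.1 + 1, q + 6) else st) ((0 : Int), (0 : Int))
        if cn.1 ≥ 2 then PySem.Set.add g p.1 else g)
      = (fun g p => if pvGCond p then PySem.Set.add g p.1 else g) := by
    funext g p
    by_cases h1 : PySem.Chars.isIn ['R'] p.1 || PySem.Chars.isIn ['Y'] p.1 || PySem.Chars.isIn ['N'] p.1
    · simp [h1, pvGCond]
    · by_cases h2 : 2 ≤ (p.2.foldl (fun st q => if st.2 ≤ q then (st.1 + 1, q + 6) else st) ((0 : Int), (0 : Int))).1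
      · simp [h1, h2, pvGCond, ge_iff_le]
      · simp [h1, h2, pvGCond, ge_iff_le]
  rw [hbody, PySem.List.foldl_if_eq_foldl_filter pvGCond (fun g p => PySem.Set.add g p.1)]
  rw [PySem.Set.ofList_eq_foldl, List.foldl_map]
  rfl

theorem pv_WL_getElem (s : List Char) (k : Nat) (hk : k < (pvWL s).length) :
    (pvWL s)[k] = pvWin s k := by
  simp [pvWL]

theorem pv_WL_length (s : List Char) : (pvWL s).length = pvM s := by simp [pvWL]

theorem pv_PS_count (s w : List Char) (hw6 : w.length = 6) :
    ((pvPS s w).foldl (fun st q => if st.2 ≤ q then (st.1 + 1, q + 6) else st) ((0 : Int), (0 : Int))).1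
      = (PySem.Chars.count s w : Int) := by
  have hw : w ≠ [] := by intro h; rw [h] at hw6; simp at hw6
  rw [pv_greedy s w hw6 (pvPS s w) 0 0 le_rfl ?_ ?_ ?_]
  · rw [pv_count_eq s w hw]; norm_num
  · exact List.pairwise_map.mpr ((PySem.List.pairwise_lt_enumerate (pvWL s) 0).filter _)
  · intro q hq
    rw [pvPS] at hq
    obtain ⟨p, hpmem, rfl⟩ := List.mem_map.mp hq
    have hpf := List.mem_filter.mp hpmem
    obtain ⟨k, hk, rfl⟩ := (PySem.List.mem_enumerate_iff _ _ _).mp hpf.1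
    refine ⟨k, by simp, ?_⟩
    have hbeq : (pvWL s)[k] = w := by simpa using hpf.2
    rw [← hbeq, pv_WL_getElem s k hk]
    exact pv_win_prefix s k
  · intro k _ hkpre
    have hb := pv_occ_bound s w hw k hkpre
    rw [hw6] at hb
    have hkm : k < (pvWL s).length := by rw [pv_WL_length]; exact (pv_mem_range_iff s k).mpr hb
    rw [pvPS]
    apply List.mem_map.mpr
    refine ⟨((0 : Int) + (k : Nat), (pvWL s)[k]), List.mem_filter.mpr ⟨?_, ?_⟩, by simp⟩
    · exact (PySem.List.mem_enumerate_iff _ _ _).mpr ⟨k, hkm, rfl⟩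
    · simp only [pv_WL_getElem s k hkm]
      exact beq_iff_eq.mpr (pv_prefix_win s w k hw6 hkpre)

theorem pv_clean_eq (w : List Char) :
    (!(['R','Y','N'] : List Char).any (fun base => PySem.Chars.isIn [base] w)) = pvClean w := by
  simp [pvClean, Bool.and_assoc]

theorem pv_gcond_eq (s w : List Char) (hw6 : w.length = 6) :
    pvGCond (w, pvPS s w) = pvCond s w := by
  rw [pvGCond, pvCond, pvClean]
  simp only [pv_PS_count s w hw6]
  congr 1
  have : ((2 : Int) ≤ (PySem.Chars.count s w : Int)) ↔ (2 ≤ PySem.Chars.count s w) := by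
    exact_mod_cast Iff.rfl
  simp [this]

theorem pv_A_eq (dna_seq : String) :
    homology_repeats dna_seq
      = ((List.range (pvM dna_seq.toList)).countP
          (fun k => pvCond dna_seq.toList (pvWin dna_seq.toList k)) : Int) := by
  rw [homology_repeats]
  rw [pv_range, List.foldl_map]
  refine Eq.trans (PySem.List.foldl_congr_mem _ _ (fun (acc : Int) (k : Nat) =>
      if pvCond dna_seq.toList (pvWin dna_seq.toList k) = true then acc + 1 else acc) _ ?_) ?_
  · intro acc k hk
    have hk6 : k + 6 ≤ dna_seq.toList.length := by
      rw [List.mem_range] at hk; omega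
    show (if (!(['R','Y','N'] : List Char).any fun base => PySem.Chars.isIn [base]
        [PySem.List.pyGetD dna_seq.toList (k : Int) ' ', PySem.List.pyGetD dna_seq.toList ((k : Int) + 1) ' ',
         PySem.List.pyGetD dna_seq.toList ((k : Int) + 2) ' ', PySem.List.pyGetD dna_seq.toList ((k : Int) + 3) ' ',
         PySem.List.pyGetD dna_seq.toList ((k : Int) + 4) ' ', PySem.List.pyGetD dna_seq.toList ((k : Int) + 5) ' ']) = true
      then if PySem.Chars.count dna_seq.toList
        [PySem.List.pyGetD dna_seq.toList (k : Int) ' ', PySem.List.pyGetD dna_seq.toList ((k : Int) + 1) ' ',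
         PySem.List.pyGetD dna_seq.toList ((k : Int) + 2) ' ', PySem.List.pyGetD dna_seq.toList ((k : Int) + 3) ' ',
         PySem.List.pyGetD dna_seq.toList ((k : Int) + 4) ' ', PySem.List.pyGetD dna_seq.toList ((k : Int) + 5) ' '] ≥ 2
        then acc + 1 else acc
      else acc) = _
    rw [pv_windowA dna_seq.toList k hk6, pv_clean_eq]
    by_cases h1 : pvClean (pvWin dna_seq.toList k)
    · by_cases h2 : 2 ≤ PySem.Chars.count dna_seq.toList (pvWin dna_seq.toList k)
      · simp [h1, h2, pvCond, ge_iff_le]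
      · simp [h1, h2, pvCond, ge_iff_le]
    · simp [h1, pvCond]
  · rw [PySem.List.foldl_if_add_one, zero_add]
    rfl

theorem pv_B_eq (dna_seq : String) :
    homology_repeats_alt dna_seq
      = ((List.range (pvM dna_seq.toList)).countP
          (fun k => pvCond dna_seq.toList (pvWin dna_seq.toList k)) : Int) := by
  rw [homology_repeats_alt]
  simp only [pv_windows_eq, pv_items_pos, pv_good_eq]
  rw [PySem.List.foldl_if_add_one (fun w => PySem.Set.contains
    (PySem.Set.ofList ((((PySem.Set.ofList (pvWL dna_seq.toList)).map
      (fun w => (w, pvPS dna_seq.toList w))).filter pvGCond).map (fun p => p.1))) w), zero_add]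
  congr 1
  rw [pvWL, List.countP_map]
  apply List.countP_congr
  intro k hk
  rw [List.mem_range] at hk
  have hk6 : k + 6 ≤ dna_seq.toList.length := (pv_mem_range_iff _ k).mp hk
  have hw6 := pv_win_len dna_seq.toList k hk6
  simp only [Function.comp]
  rw [PySem.Set.contains_iff, PySem.Set.mem_ofList]
  constructor
  · intro hmem
    obtain ⟨p, hpf, hp1⟩ := List.mem_map.mp hmem
    have hpc := List.mem_filter.mp hpf
    obtain ⟨u, hu, rfl⟩ := List.mem_map.mp hpc.1
    simp only at hp1
    have hcond := hpc.2
    rw [pv_gcond_eq dna_seq.toList u (hp1 ▸ hw6)] at hcond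
    rw [← hp1]
    exact hcond
  · intro hc
    apply List.mem_map.mpr
    refine ⟨(pvWin dna_seq.toList k, pvPS dna_seq.toList (pvWin dna_seq.toList k)),
      List.mem_filter.mpr ⟨?_, ?_⟩, rfl⟩
    · apply List.mem_map.mpr
      refine ⟨pvWin dna_seq.toList k, ?_, rfl⟩
      rw [PySem.Set.mem_ofList]
      exact List.mem_map.mpr ⟨k, List.mem_range.mpr hk, rfl⟩
    · rw [pv_gcond_eq dna_seq.toList _ hw6]; exact hc

-- ===== VERDICT (by name: the statement is the Claim_ definition above) =====
theorem homology_repeats_spec : Claim_equal_homology_repeats := by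
  intro dna_seq _
  unfold Spec_homology_repeats
  rw [pv_A_eq, pv_B_eq]
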